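-- pv_equiv track=rewrite | github.com/gistable/gistable | dockerized-gists/92061d1d5dff99e14cb6/snippet.py | shouldRemoveX
-- ===== SOURCE A (Python) =====
-- def shouldRemoveX(array):
-- 	numX = 0
-- 	numReddits = 0
-- 	for  i in range(0,len(array)):
-- 		if array[i] != None:
-- 			if array[i][:3] == 'add':
-- 				break
-- 			if array[i][:3] == '/r/':
-- 				numReddits +=1
-- 				if array[i][-1:] ==  'x':
-- 					numX += 1
-- 	return numReddits == numX
-- ===== SOURCE B (Python) =====
-- def shouldRemoveX(array):
--     cut = len(array)
--     for i, e in enumerate(array):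
--         if e is not None and e[:3] == 'add':
--             cut = i
--             break
--     suffixes = {e[-1:] for e in array[:cut] if e is not None and e[:3] == '/r/'}
--     return suffixes <= {'x'}
-- ===== Notes on version B (the rewrite author's own statement) =====
-- stated objective: alternative
-- what changed: Replaces A's single counting loop (numReddits/numX with final equality) by three stages: first find the cut index of the first 'add' entry, then slice the list at it, then collect the last characters of its '/r/' entries into a set and test that set for inclusion in {'x'}.
import Mathlib
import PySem

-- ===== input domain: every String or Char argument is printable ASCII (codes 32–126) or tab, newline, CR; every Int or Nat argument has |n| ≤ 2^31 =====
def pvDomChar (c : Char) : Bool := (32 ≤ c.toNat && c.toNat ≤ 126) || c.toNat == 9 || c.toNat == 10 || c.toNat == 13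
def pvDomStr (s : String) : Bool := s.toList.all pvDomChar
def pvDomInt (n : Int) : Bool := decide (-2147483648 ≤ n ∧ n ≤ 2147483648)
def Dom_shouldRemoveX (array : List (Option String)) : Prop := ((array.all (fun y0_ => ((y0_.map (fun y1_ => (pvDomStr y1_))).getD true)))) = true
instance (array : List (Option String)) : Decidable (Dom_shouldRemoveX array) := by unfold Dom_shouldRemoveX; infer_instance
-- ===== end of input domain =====

-- B replaces A's counting loop by three stages: find the cut index of the first 'add'
-- entry, slice the list there, and test the set of last characters of its '/r/'
-- entries for inclusion in {'x'} (objective: alternative, same cost).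

-- ===== PORT A =====
-- the for-loop with break: structural recursion carrying the two counters numX, numReddits
def shouldRemoveXLoop : List (Option String) → Int → Int → Bool
  | [], numX, numReddits => numReddits == numX
  | e :: rest, numX, numReddits =>
    match e with
    | none => shouldRemoveXLoop rest numX numReddits
    | some s =>
      if PySem.List.slice s.toList none (some 3) = "add".toList then
        numReddits == numX                                   -- break: fall through to the return
      else if PySem.List.slice s.toList none (some 3) = "/r/".toList then
        if PySem.List.slice s.toList (some (-1)) none = "x".toList then
          shouldRemoveXLoop rest (numX + 1) (numReddits + 1)
        else
          shouldRemoveXLoop rest numX (numReddits + 1)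
      else shouldRemoveXLoop rest numX numReddits

def shouldRemoveX (array : List (Option String)) : Bool :=
  shouldRemoveXLoop array 0 0

-- ===== PORT B =====
-- stage 1: the enumerate loop looking for the first 'add' entry (cut = len(array) if none)
def shouldRemoveXCut : List (Option String) → Nat
  | [] => 0
  | e :: rest =>
    match e with
    | some s =>
      if PySem.List.slice s.toList none (some 3) = "add".toList then 0
      else shouldRemoveXCut rest + 1
    | none => shouldRemoveXCut rest + 1

def shouldRemoveX_alt (array : List (Option String)) : Bool :=
  -- stage 2 & 3: the set comprehension over array[:cut], then subset test against {'x'}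
  PySem.Set.issubset
    (PySem.Set.ofList
      ((PySem.List.slice array none (some (shouldRemoveXCut array : Int))).filterMap (fun e =>
        match e with
        | some s =>
          if PySem.List.slice s.toList none (some 3) = "/r/".toList then
            some (PySem.List.slice s.toList (some (-1)) none)
          else none
        | none => none)))
    (PySem.Set.ofList ["x".toList])

-- ===== PRECONDITION & SPEC =====
def Spec_shouldRemoveX (array : List (Option String)) (out : Bool) : Prop := out = shouldRemoveX_alt array
instance (array : List (Option String)) (out : Bool) : Decidable (Spec_shouldRemoveX array out) := by unfold Spec_shouldRemoveX; infer_instance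

-- ===== CLAIM (what is proved, stated in full; the proofs are below) =====
def Claim_equal_shouldRemoveX : Prop := ∀ (array : List (Option String)), Dom_shouldRemoveX array → Spec_shouldRemoveX array (shouldRemoveX array)

-- ===== LEMMAS AND PROOFS =====

-- the head-filter predicate of both programs, as used by the proofs
def pvNotAdd (e : Option String) : Bool :=
  match e with
  | none => true
  | some s => !(PySem.List.slice s.toList none (some 3) == "add".toList)

-- stage 1 + stage 2 of B produce exactly the takeWhile prefix
theorem take_cut (xs : List (Option String)) :
    xs.take (shouldRemoveXCut xs) = xs.takeWhile pvNotAdd := by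
  induction xs with
  | nil => simp [shouldRemoveXCut]
  | cons e rest ih =>
    cases e with
    | none => simp [shouldRemoveXCut, pvNotAdd, List.takeWhile, ih]
    | some s =>
      by_cases h : PySem.List.slice s.toList none (some 3) = "add".toList
      · simp [shouldRemoveXCut, pvNotAdd, List.takeWhile, h]
      · have h2 : ¬ PySem.List.slice s.toList none (some 3) = ['a','d','d'] := h
        have h' : (PySem.List.slice s.toList none (some 3) == ['a','d','d']) = false :=
          beq_eq_false_iff_ne.mpr h
        simp [shouldRemoveXCut, pvNotAdd, List.takeWhile, h2, h', ih]

-- a set built from a list is included in a singleton set iff every list element is that element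
theorem ofList_issubset_singleton (L : List (List Char)) (x : List Char) :
    PySem.Set.issubset (PySem.Set.ofList L) (PySem.Set.ofList [x]) = L.all (· == x) := by
  rw [Bool.eq_iff_iff, PySem.Set.issubset_iff, List.all_eq_true]
  constructor
  · intro h a ha
    have := h a (by rw [PySem.Set.mem_ofList]; exact ha)
    rw [PySem.Set.mem_ofList] at this
    simpa using this
  · intro h a ha
    rw [PySem.Set.mem_ofList] at ha ⊢
    simpa using h a ha

-- all over a filterMap is all of the lifted predicate
theorem all_filterMap_opt (xs : List (Option String))
    (f : Option String → Option (List Char)) (p : List Char → Bool) :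
    (xs.filterMap f).all p = xs.all (fun e => (f e).all p) := by
  induction xs with
  | nil => rfl
  | cons e rest ih =>
    cases h : f e with
    | none => simp [List.filterMap_cons, h, ih]
    | some v => simp [List.filterMap_cons, h, ih]

-- B computed in A's shape: 'all /r/ entries of the takeWhile prefix end in x'
theorem alt_eq_all (xs : List (Option String)) :
    shouldRemoveX_alt xs =
      (xs.takeWhile pvNotAdd).all (fun e =>
        match e with
        | none => true
        | some s =>
          if PySem.List.slice s.toList none (some 3) = "/r/".toList then
            PySem.List.slice s.toList (some (-1)) none == "x".toList
          else true) := by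
  unfold shouldRemoveX_alt
  rw [PySem.List.slice_to_natCast, take_cut, ofList_issubset_singleton, all_filterMap_opt]
  congr 1
  funext e
  cases e with
  | none => rfl
  | some s =>
    by_cases h : PySem.List.slice s.toList none (some 3) = ['/','r','/'] <;>
      simp [h, Option.all]

-- loop invariant: with numX ≤ numReddits, A's loop returns true iff the counters are
-- currently equal AND every remaining /r/ entry before the first add entry ends in x.
theorem shouldRemoveXLoop_eq (xs : List (Option String)) :
    ∀ (x r : Int), x ≤ r →
      shouldRemoveXLoop xs x r = ((x == r) && shouldRemoveX_alt xs) := by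
  induction xs with
  | nil =>
    intro x r _
    simp [shouldRemoveXLoop, alt_eq_all, eq_comm]
  | cons e rest ih =>
    intro x r hxr
    rw [alt_eq_all]
    cases e with
    | none =>
      rw [shouldRemoveXLoop, ih x r hxr, alt_eq_all]
      simp [pvNotAdd, List.takeWhile]
    | some s =>
      by_cases hadd : PySem.List.slice s.toList none (some 3) = "add".toList
      · simp [shouldRemoveXLoop, List.takeWhile, pvNotAdd, hadd, eq_comm]
      · have haddL : ¬ PySem.List.slice s.toList none (some 3) = ['a','d','d'] := hadd
        have hadd' : (PySem.List.slice s.toList none (some 3) == ['a','d','d']) = false :=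
          beq_eq_false_iff_ne.mpr hadd
        rw [shouldRemoveXLoop]
        by_cases hr : PySem.List.slice s.toList none (some 3) = "/r/".toList
        · have hrL : PySem.List.slice s.toList none (some 3) = ['/','r','/'] := hr
          by_cases hx : PySem.List.slice s.toList (some (-1)) none = "x".toList
          · have hb : (x + 1 == r + 1) = (x == r) := by
              rcases eq_or_ne x r with h | h
              · simp [h]
              · simp [h, show x + 1 ≠ r + 1 by omega]
            have hxL : PySem.List.slice s.toList (some (-1)) none = ['x'] := hx
            rw [if_neg hadd, if_pos hr, if_pos hx]
            rw [ih (x + 1) (r + 1) (by omega), alt_eq_all, hb]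
            simp [pvNotAdd, List.takeWhile, hadd', hrL, hxL]
          · have hne : (x == r + 1) = false := by
              simp [show x ≠ r + 1 by omega]
            have hx' : (PySem.List.slice s.toList (some (-1)) none == ['x']) = false :=
              beq_eq_false_iff_ne.mpr hx
            rw [if_neg hadd, if_pos hr, if_neg hx]
            rw [ih x (r + 1) (by omega), alt_eq_all, hne]
            simp [pvNotAdd, List.takeWhile, hadd', hrL, hx']
        · have hrL : ¬ PySem.List.slice s.toList none (some 3) = ['/','r','/'] := hr
          rw [if_neg hadd, if_neg hr]
          rw [ih x r hxr, alt_eq_all]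
          simp [pvNotAdd, List.takeWhile, hadd', hrL]

-- ===== VERDICT (by name: the statement is the Claim_ definition above) =====
theorem shouldRemoveX_spec : Claim_equal_shouldRemoveX := by
  intro array _
  unfold Spec_shouldRemoveX shouldRemoveX
  simp [shouldRemoveXLoop_eq array 0 0 le_rfl]
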